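-- pv_equiv track=rewrite | github.com/Gu-Lab-RBL-NCI/scripts-susanna | getUniqueMotif.py | getIUPAC
-- ===== SOURCE A (Python) =====
-- def getIUPAC(base):
--     codes = {'N':['A', 'G', 'C', 'T'],
--              'V':['A', 'G', 'C'],
--              'H':['A', 'T', 'C'],
--              'D':['A', 'G', 'T'],
--              'B':['T', 'G', 'C'],
--              'M':['A', 'C'],
--              'K':['G', 'T'],
--              'W':['A', 'T'],
--              'S':['G', 'C'],
--              'Y':['T', 'C'],
--              'R':['A', 'G'],
--             }
--     result = []
--     for key in codes:
--         values = codes[key]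
--         if base in values:
--             result.append(key)
--     return result
-- ===== SOURCE B (Python) =====
-- def getIUPAC(base):
--     if base == 'A':
--         return ['N', 'V', 'H', 'D', 'M', 'W', 'R']
--     elif base == 'G':
--         return ['N', 'V', 'D', 'B', 'K', 'S', 'R']
--     elif base == 'C':
--         return ['N', 'V', 'H', 'B', 'M', 'S', 'Y']
--     elif base == 'T':
--         return ['N', 'H', 'D', 'B', 'K', 'W', 'Y']
--     else:
--         return []
-- ===== Notes on version B (the rewrite author's own statement) =====
-- stated objective: simpler
-- what changed: Replaced A's loop over the IUPAC code dict with a direct four-way branch returning the precomputed inverse answer list for each base (no dict, no loop).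
import Mathlib
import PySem

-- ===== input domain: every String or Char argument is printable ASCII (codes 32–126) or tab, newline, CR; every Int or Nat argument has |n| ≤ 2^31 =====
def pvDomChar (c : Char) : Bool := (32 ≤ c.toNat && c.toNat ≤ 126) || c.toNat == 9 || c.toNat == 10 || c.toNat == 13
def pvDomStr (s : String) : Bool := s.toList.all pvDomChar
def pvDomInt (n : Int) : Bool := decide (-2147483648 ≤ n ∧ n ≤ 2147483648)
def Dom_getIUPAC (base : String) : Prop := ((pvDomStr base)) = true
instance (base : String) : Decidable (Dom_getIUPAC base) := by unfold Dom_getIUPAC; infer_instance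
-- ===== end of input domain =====

-- B replaces A's loop over the IUPAC dict with a direct four-way branch on the base (simpler).

-- ===== PORT A =====
-- A's `codes` dict, in insertion order
def getIUPAC_codes : PySem.Dict String (List String) :=
  PySem.Dict.ofList
    [("N", ["A", "G", "C", "T"]),
     ("V", ["A", "G", "C"]),
     ("H", ["A", "T", "C"]),
     ("D", ["A", "G", "T"]),
     ("B", ["T", "G", "C"]),
     ("M", ["A", "C"]),
     ("K", ["G", "T"]),
     ("W", ["A", "T"]),
     ("S", ["G", "C"]),
     ("Y", ["T", "C"]),
     ("R", ["A", "G"])]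

def getIUPAC (base : String) : List String :=
  -- for key in codes: values = codes[key]; if base in values: result.append(key)
  getIUPAC_codes.keys.foldl
    (fun result key =>
      let values := getIUPAC_codes.getD key []
      if values.contains base then result ++ [key] else result)
    []

-- ===== PORT B =====
def getIUPAC_alt (base : String) : List String :=
  if base = "A" then ["N", "V", "H", "D", "M", "W", "R"]
  else if base = "G" then ["N", "V", "D", "B", "K", "S", "R"]
  else if base = "C" then ["N", "V", "H", "B", "M", "S", "Y"]
  else if base = "T" then ["N", "H", "D", "B", "K", "W", "Y"]
  else []

-- ===== PRECONDITION & SPEC =====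
def Spec_getIUPAC (base : String) (out : List String) : Prop := out = getIUPAC_alt base
instance (base : String) (out : List String) : Decidable (Spec_getIUPAC base out) := by unfold Spec_getIUPAC; infer_instance

-- ===== CLAIM (what is proved, stated in full; the proofs are below) =====
def Claim_equal_getIUPAC : Prop := ∀ (base : String), Dom_getIUPAC base → Spec_getIUPAC base (getIUPAC base)

-- ===== LEMMAS AND PROOFS =====

-- ===== VERDICT (by name: the statement is the Claim_ definition above) =====
theorem getIUPAC_spec : Claim_equal_getIUPAC := by
  intro base _
  unfold Spec_getIUPAC
  by_cases hA : base = "A"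
  · subst hA; decide
  · by_cases hG : base = "G"
    · subst hG; decide
    · by_cases hC : base = "C"
      · subst hC; decide
      · by_cases hT : base = "T"
        · subst hT; decide
        · simp [getIUPAC, getIUPAC_alt, getIUPAC_codes,
                PySem.Dict.ofList, PySem.Dict.keys, PySem.Dict.getD,
                PySem.Dict.get?, PySem.Dict.update, PySem.Dict.empty, PySem.Dict.insert,
                PySem.Dict.items, List.find?, hA, hG, hC, hT,
                Ne.symm hA, Ne.symm hG, Ne.symm hC, Ne.symm hT]
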